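-- pv_equiv track=rewrite | github.com/italy-dude/GUIDB-GUID-Breve | Python/guidb.py | text_as_number
-- ===== SOURCE A (Python) =====
-- def text_as_number(input_string, alphabet):
--     value = 0
--
--     radix = len(alphabet)
--     input_length = len(input_string)
--
--     for i in range(0, input_length):
--         # prende carattere in ingresso partendo dalla fine
--         c = input_string[input_length - (i + 1)]
--
--         # ritorna potenza di 16 della posizione corrente (1, 16, 256, 4096 ...)
--         # ritorna indice nell'alfabeto originale del carattere in ingresso
--         # aggiungi a value che parte da 0 la moltiplicazione di X per Y
--
--         value = value + ((radix ** i) * alphabet.index(c))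
--     return value
-- ===== SOURCE B (Python) =====
-- def text_as_number(input_string, alphabet):
--     # Horner's rule left-to-right, with a first-occurrence index table built once.
--     radix = len(alphabet)
--     index = {}
--     for i, ch in enumerate(alphabet):
--         if ch not in index:
--             index[ch] = i
--     value = 0
--     for c in input_string:
--         value = value * radix + index[c]
--     return value
-- ===== Notes on version B (the rewrite author's own statement) =====
-- stated objective: faster
-- what changed: Replaces the per-digit power computation radix**i plus an O(radix) alphabet.index scan inside the loop by Horner's rule over the string with a first-occurrence index dictionary built once from the alphabet.
import Mathlib
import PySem

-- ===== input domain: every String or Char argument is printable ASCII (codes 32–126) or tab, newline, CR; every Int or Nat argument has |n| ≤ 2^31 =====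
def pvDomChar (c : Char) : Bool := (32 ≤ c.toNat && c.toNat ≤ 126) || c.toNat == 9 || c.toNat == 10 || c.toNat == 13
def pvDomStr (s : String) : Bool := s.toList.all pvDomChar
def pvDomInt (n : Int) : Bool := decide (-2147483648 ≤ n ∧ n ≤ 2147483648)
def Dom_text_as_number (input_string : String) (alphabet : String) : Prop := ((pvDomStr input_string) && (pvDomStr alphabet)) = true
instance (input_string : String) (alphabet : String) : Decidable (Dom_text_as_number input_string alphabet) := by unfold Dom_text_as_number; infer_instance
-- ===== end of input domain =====

-- B replaces A's per-digit `radix ** i` and O(radix) `alphabet.index` inner scan by Horner's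
-- rule over the string with a first-occurrence index dictionary built once (objective: faster).

-- ===== PORT A =====
-- `alphabet.index(c)` raises ValueError where the character is absent (excluded by Pre_);
-- there PySem.Str.find returns -1 instead.  `radix ** i` has i ≥ 0 (from range), so `radix ^ i.toNat`
-- is exact.  `input_string[input_length - (i+1)]` is always in range for i in range(input_length),
-- so the `.getD ' '` default is never taken.
def text_as_number (input_string : String) (alphabet : String) : Int :=
  let value : Int := 0
  let radix : Int := PySem.Str.len alphabet
  let input_length : Int := PySem.Str.len input_string
  (PySem.List.pyRange 0 input_length).foldl
    (fun value i =>
      let c : Char := (PySem.Str.pyGet? input_string (input_length - (i + 1))).getD ' '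
      value + (radix ^ i.toNat) * PySem.Str.find alphabet (String.ofList [c]))
    value

-- ===== PORT B =====
-- `index[c]` raises KeyError where the character is absent (excluded by Pre_); the `.getD 0`
-- default is never taken there.
def text_as_number_alt (input_string : String) (alphabet : String) : Int :=
  let radix : Int := PySem.Str.len alphabet
  let index : PySem.Dict Char Int :=
    (PySem.List.enumerate alphabet.toList).foldl
      (fun d p => if d.contains p.2 then d else d.insert p.2 p.1) PySem.Dict.empty
  input_string.toList.foldl (fun value c => value * radix + (index.get? c).getD 0) 0

-- ===== PRECONDITION & SPEC =====
-- Pre_ excludes exactly the inputs where a character of input_string does not occur in alphabet: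
-- there A raises ValueError (and B raises KeyError).
def Pre_text_as_number (input_string : String) (alphabet : String) : Prop :=
  (input_string.toList.all (fun c => alphabet.toList.contains c)) = true
instance (input_string : String) (alphabet : String) : Decidable (Pre_text_as_number input_string alphabet) := by
  unfold Pre_text_as_number; infer_instance

def pvWitness_text_as_number : String × String := ("cab", "abc")

def Spec_text_as_number (input_string : String) (alphabet : String) (out : Int) : Prop := out = text_as_number_alt input_string alphabet
instance (input_string : String) (alphabet : String) (out : Int) : Decidable (Spec_text_as_number input_string alphabet out) := by unfold Spec_text_as_number; infer_instance

-- ===== CLAIM (what is proved, stated in full; the proofs are below) =====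
def Claim_equal_text_as_number : Prop := ∀ (input_string : String) (alphabet : String), Dom_text_as_number input_string alphabet → Pre_text_as_number input_string alphabet → Spec_text_as_number input_string alphabet (text_as_number input_string alphabet)

-- ===== LEMMAS AND PROOFS =====

-- [c] is a prefix of l exactly when l starts with c
theorem pv_singleton_prefix (c : Char) (l : List Char) : [c] <+: l ↔ l.head? = some c := by
  cases l with
  | nil => simp
  | cons y t => simp [List.cons_prefix_cons, eq_comm]

-- an index strictly below idxOf does not hold the character
theorem pv_lt_idxOf_ne (l : List Char) (c : Char) (m : Nat) (h : m < l.idxOf c)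
    (hm : m < l.length) : l[m] ≠ c := by
  have := List.not_of_lt_findIdx (p := (· == c)) (xs := l) (by simpa [List.idxOf] using h)
  simpa using this

-- Python find of a single character = first index of that character, when present
theorem pv_find_singleton (al : List Char) (c : Char) (h : c ∈ al) :
    PySem.Chars.find al [c] = (al.idxOf c : Int) := by
  have hinf : [c] <:+: al := by
    obtain ⟨s, t, rfl⟩ := List.append_of_mem h
    exact ⟨s, t, by simp⟩
  have h0 : 0 ≤ PySem.Chars.find al [c] := (PySem.Chars.find_nonneg_iff al [c]).2 hinf
  obtain ⟨hpre, hmin⟩ := PySem.Chars.find_spec h0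
  set j := (PySem.Chars.find al [c]).toNat with hj
  have hjc : al[j]? = some c := by
    have := (pv_singleton_prefix c (al.drop j)).1 hpre
    rwa [List.head?_drop] at this
  have hjlen : j < al.length := by
    by_contra hle
    simp [List.getElem?_eq_none (Nat.le_of_not_lt hle)] at hjc
  have hilen : al.idxOf c < al.length := List.idxOf_lt_length_of_mem h
  have hic : al[al.idxOf c]'hilen = c := List.getElem_idxOf _
  have hji : j ≤ al.idxOf c := by
    by_contra hlt
    refine hmin (al.idxOf c) (Nat.lt_of_not_le hlt) ((pv_singleton_prefix c (al.drop (al.idxOf c))).2 ?_)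
    rw [List.head?_drop]
    simp [List.getElem?_eq_getElem hilen, hic]
  have hij : al.idxOf c ≤ j := by
    by_contra hlt
    refine pv_lt_idxOf_ne al c j (Nat.lt_of_not_le hlt) hjlen ?_
    simpa [List.getElem?_eq_getElem hjlen] using hjc
  have hje : j = al.idxOf c := le_antisymm hji hij
  rw [← Int.toNat_of_nonneg h0, ← hj, hje]

-- the first-wins dict fold: lookup = existing binding, else first matching pair of the rest
theorem pv_dict_fold_get? (l : List (Int × Char)) (d : PySem.Dict Char Int) (c : Char) :
    ((l.foldl (fun (d : PySem.Dict Char Int) (p : Int × Char) => if d.contains p.2 then d else d.insert p.2 p.1) d).get? c)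
    = ((d.get? c).or ((l.find? (fun p => p.2 == c)).map Prod.fst)) := by
  induction l generalizing d with
  | nil => simp
  | cons p t ih =>
    obtain ⟨i, ch⟩ := p
    simp only [List.foldl_cons]
    by_cases hc : d.contains ch = true
    · rw [if_pos hc, ih]
      by_cases hch : ch = c
      · subst hch
        have hs : (d.get? ch).isSome := by
          rw [← PySem.Dict.contains_eq_isSome_get?]; exact hc
        obtain ⟨v, hv⟩ := Option.isSome_iff_exists.1 hs
        rw [List.find?_cons_of_pos (by simp)]
        simp [hv]
      · rw [List.find?_cons_of_neg (by simp [hch])]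
    · rw [if_neg hc, ih]
      by_cases hch : ch = c
      · subst hch
        have hnone : d.get? ch = none := by
          rw [PySem.Dict.get?_eq_none_iff_contains]
          simpa using hc
        rw [List.find?_cons_of_pos (by simp)]
        simp [PySem.Dict.get?_insert_self, hnone]
      · have hne : c ≠ ch := fun he => hch he.symm
        rw [PySem.Dict.get?_insert_of_ne _ _ hne]
        rw [List.find?_cons_of_neg (by simp [hch])]

-- find? over enumerate = offset + idxOf
theorem pv_enumerate_find? (c : Char) : ∀ (al : List Char) (k : Int), c ∈ al →
    ((PySem.List.enumerate al k).find? (fun p => p.2 == c)).map Prod.fst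
      = some (k + (al.idxOf c : Int)) := by
  intro al
  induction al with
  | nil => intro k h; simp at h
  | cons x t ih =>
    intro k h
    rw [show PySem.List.enumerate (x :: t) k = (k, x) :: PySem.List.enumerate t (k + 1) from by
      simp [PySem.List.enumerate]]
    by_cases hx : x = c
    · subst hx
      rw [List.find?_cons_of_pos (by simp)]
      simp
    · have hct : c ∈ t := by
        rcases List.mem_cons.1 h with h1 | h1
        · exact absurd h1.symm hx
        · exact h1
      have hb : (x == c) = false := by simpa using hx
      rw [List.find?_cons_of_neg (by simp [hx])]
      rw [ih (k + 1) hct, List.idxOf_cons, hb]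
      simp only [cond_false, Option.some.injEq]
      push_cast
      ring

-- B's dictionary lookup is idxOf
theorem pv_index_get (al : List Char) (c : Char) (h : c ∈ al) :
    (((PySem.List.enumerate al).foldl
      (fun (d : PySem.Dict Char Int) (p : Int × Char) => if d.contains p.2 then d else d.insert p.2 p.1)
      PySem.Dict.empty).get? c) = some (al.idxOf c : Int) := by
  rw [pv_dict_fold_get?]
  simpa using pv_enumerate_find? c al 0 h

-- Horner with accumulator
theorem pv_horner_acc (r : Int) (l : List Int) : ∀ (a : Int),
    l.foldl (fun v x => v * r + x) a = a * r ^ l.length + l.foldl (fun v x => v * r + x) 0 := by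
  induction l with
  | nil => intro a; simp
  | cons x t ih =>
    intro a
    simp only [List.foldl_cons, List.length_cons]
    rw [ih (a * r + x), ih (0 * r + x)]
    ring

-- the reversed power sum is Horner's value
theorem pv_sum_rev_eq_horner (r : Int) (l : List Int) :
    ((List.range l.length).map (fun k => r ^ k * l.getD (l.length - 1 - k) 0)).sum
    = l.foldl (fun v x => v * r + x) 0 := by
  induction l with
  | nil => simp
  | cons x t ih =>
    simp only [List.length_cons, List.range_succ, List.map_append, List.sum_append,
      List.map_cons, List.map_nil, List.sum_cons, List.sum_nil]
    have hmap : (List.range t.length).map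
          (fun k => r ^ k * (x :: t).getD (t.length + 1 - 1 - k) 0)
        = (List.range t.length).map (fun k => r ^ k * t.getD (t.length - 1 - k) 0) := by
      refine List.map_congr_left ?_
      intro k hk
      have hk' : k < t.length := List.mem_range.1 hk
      have h1 : t.length + 1 - 1 - k = (t.length - 1 - k) + 1 := by omega
      rw [h1, List.getD_cons_succ]
    rw [hmap, ih]
    have h2 : t.length + 1 - 1 - t.length = 0 := by omega
    rw [h2, List.getD_cons_zero, List.foldl_cons]
    rw [pv_horner_acc r t (0 * r + x)]
    ring

-- ===== VERDICT (by name: the statement is the Claim_ definition above) =====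
theorem text_as_number_spec : Claim_equal_text_as_number := by
  intro s a _ hpre0
  have hpre : ∀ c ∈ s.toList, c ∈ a.toList := by
    intro c hc
    exact List.contains_iff_mem.1 ((List.all_eq_true.1 hpre0) c hc)
  unfold Spec_text_as_number text_as_number text_as_number_alt
  simp only [PySem.Str.len_eq]
  rw [PySem.List.pyRange_zero_natCast, List.foldl_map, PySem.List.foldl_add, zero_add]
  have hsum : (List.range s.toList.length).map
        (fun (k : Nat) => ((a.toList.length : Int)) ^ ((k : Int)).toNat *
          PySem.Str.find a (String.ofList
            [(PySem.Str.pyGet? s ((s.toList.length : Int) - ((k : Int) + 1))).getD ' ']))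
      = (List.range s.toList.length).map
        (fun (k : Nat) => ((a.toList.length : Int)) ^ k *
          (s.toList.map (fun c => (a.toList.idxOf c : Int))).getD (s.toList.length - 1 - k) 0) := by
    refine List.map_congr_left ?_
    intro k hk
    have hk' : k < s.toList.length := List.mem_range.1 hk
    have hidx : (s.toList.length : Int) - ((k : Int) + 1)
        = ((s.toList.length - 1 - k : Nat) : Int) := by omega
    have hlt : s.toList.length - 1 - k < s.toList.length := by omega
    rw [hidx, PySem.Str.pyGet?_natCast, List.getElem?_eq_getElem hlt, Option.getD_some]
    have hca : s.toList[s.toList.length - 1 - k] ∈ a.toList :=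
      hpre _ (List.getElem_mem hlt)
    rw [PySem.Str.find_eq, String.toList_ofList,
      pv_find_singleton a.toList _ hca,
      List.getD_eq_getElem?_getD, List.getElem?_map, List.getElem?_eq_getElem hlt]
    simp
  rw [hsum]
  have hh := pv_sum_rev_eq_horner (a.toList.length : Int)
      (s.toList.map (fun c => (a.toList.idxOf c : Int)))
  simp only [List.length_map] at hh
  rw [hh, List.foldl_map]
  refine PySem.List.foldl_congr_mem _ _ _ _ ?_
  intro acc c hc
  rw [pv_index_get a.toList c (hpre c hc)]
  simp
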